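-- pv_equiv track=rewrite | github.com/nikunjpanchal22/code_clone_classification | python_t4_full/Clone_1920.py | two_pair
-- ===== SOURCE A (Python) =====
-- def two_pair(ranks) :
-- 	newlist = []
-- 	for i in set(ranks) :
-- 		if ranks.count(i) == 2 :
-- 			newlist.append(i)
-- 	newlist.sort(reverse = True)
-- 	newlist = tuple(newlist)
-- 	return None if newlist == () else newlist
-- ===== SOURCE B (Python) =====
-- def two_pair(ranks):
--     s = sorted(ranks, reverse=True)
--     res = []
--     i, n = 0, len(s)
--     while i < n:
--         j = i + 1
--         while j < n and s[j] == s[i]: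
--             j += 1
--         if j - i == 2:
--             res.append(s[i])
--         i = j
--     return tuple(res) if res else None
-- ===== Notes on version B (the rewrite author's own statement) =====
-- stated objective: faster
-- what changed: Instead of rescanning the whole list with .count for every distinct value and sorting the result, B sorts once in descending order and walks the sorted list in one pass, collecting the key of every run of length exactly 2 (already in the required order).
import Mathlib
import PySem

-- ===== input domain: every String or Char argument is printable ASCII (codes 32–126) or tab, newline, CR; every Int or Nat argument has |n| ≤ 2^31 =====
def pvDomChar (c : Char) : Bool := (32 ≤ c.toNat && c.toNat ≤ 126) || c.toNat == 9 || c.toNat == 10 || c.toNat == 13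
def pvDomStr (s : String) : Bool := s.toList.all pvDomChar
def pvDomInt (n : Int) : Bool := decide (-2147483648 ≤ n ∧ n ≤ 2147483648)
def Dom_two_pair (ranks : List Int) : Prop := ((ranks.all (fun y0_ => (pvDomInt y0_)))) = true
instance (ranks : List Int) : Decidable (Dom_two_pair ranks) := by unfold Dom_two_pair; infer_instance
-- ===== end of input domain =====

-- B replaces A's per-distinct-value .count rescans (O(n^2)) by one descending sort plus a
-- single run-length pass over the sorted list (O(n log n)); the kept keys come out already ordered.

-- ===== PORT A =====
def two_pair (ranks : List Int) : Option (List Int) :=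
  let newlist := (PySem.Set.ofList ranks).foldl
      (fun acc i => if PySem.List.count ranks i == 2 then acc ++ [i] else acc) []
  let newlist := PySem.List.sorted newlist (fun x => x) true
  if newlist = [] then none else some newlist

-- ===== PORT B =====
-- the outer while loop of Source B: each step consumes one maximal run of equal elements
-- (the inner `while j < n and s[j] == s[i]` scan is the takeWhile/dropWhile split)
def twoRuns : List Int → List Int
  | [] => []
  | x :: xs =>
    let run := (xs.takeWhile (fun y => y == x)).length + 1
    let rest := xs.dropWhile (fun y => y == x)
    if run = 2 then x :: twoRuns rest else twoRuns rest
termination_by l => l.length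
decreasing_by all_goals (have := List.length_dropWhile_le (fun y => y == x) xs; simp; omega)

def two_pair_alt (ranks : List Int) : Option (List Int) :=
  let res := twoRuns (PySem.List.sorted ranks (fun x => x) true)
  if res = [] then none else some res

-- ===== PRECONDITION & SPEC =====
def Spec_two_pair (ranks : List Int) (out : Option (List Int)) : Prop := out = two_pair_alt ranks
instance (ranks : List Int) (out : Option (List Int)) : Decidable (Spec_two_pair ranks out) := by unfold Spec_two_pair; infer_instance

-- ===== CLAIM (what is proved, stated in full; the proofs are below) =====
def Claim_equal_two_pair : Prop := ∀ (ranks : List Int), Dom_two_pair ranks → Spec_two_pair ranks (two_pair ranks)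

-- ===== LEMMAS AND PROOFS =====

theorem twoRuns_nil : twoRuns [] = [] := by rw [twoRuns]

theorem twoRuns_cons (x : Int) (xs : List Int) :
    twoRuns (x :: xs) =
      (if (xs.takeWhile (fun y => y == x)).length + 1 = 2
        then x :: twoRuns (xs.dropWhile (fun y => y == x))
        else twoRuns (xs.dropWhile (fun y => y == x))) := by
  rw [twoRuns]

-- in a descending list bounded above by x, everything past the leading x-run is < x
theorem lt_of_mem_dropWhile_beq (x : Int) :
    ∀ (xs : List Int), (∀ y ∈ xs, y ≤ x) → xs.Pairwise (fun a b => b ≤ a) →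
      ∀ y ∈ xs.dropWhile (fun y => y == x), y < x := by
  intro xs
  induction xs with
  | nil => intro _ _ y hy; simp [List.dropWhile] at hy
  | cons a t ih =>
    intro hle hpw y hy
    rw [List.dropWhile_cons] at hy
    by_cases ha : (a == x) = true
    · simp only [ha, if_true] at hy
      exact ih (fun z hz => hle z (by simp [hz])) (List.Pairwise.sublist (List.sublist_cons_self a t) hpw) y hy
    · simp only [ha] at hy
      have hax : a < x := lt_of_le_of_ne (hle a (by simp)) (by simpa using ha)
      rcases List.mem_cons.mp hy with h | h
      · omega
      · have : y ≤ a := (List.pairwise_cons.mp hpw).1 y h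
        omega

theorem count_cons_head_run (x : Int) (xs : List Int)
    (hle : ∀ y ∈ xs, y ≤ x) (hpw : xs.Pairwise (fun a b => b ≤ a)) :
    List.count x (x :: xs) = (xs.takeWhile (fun y => y == x)).length + 1 := by
  have hsplit : xs = xs.takeWhile (fun y => y == x) ++ xs.dropWhile (fun y => y == x) :=
    (List.takeWhile_append_dropWhile).symm
  rw [List.count_cons_self]
  conv_lhs => rw [hsplit]
  rw [List.count_append]
  have h1 : List.count x (xs.takeWhile (fun y => y == x)) = (xs.takeWhile (fun y => y == x)).length := by
    apply List.count_eq_length.mpr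
    intro y hy
    have hb : (y == x) = true := List.mem_takeWhile_imp (p := fun y => y == x) hy
    exact (eq_of_beq hb).symm
  have h2 : List.count x (xs.dropWhile (fun y => y == x)) = 0 := by
    apply List.count_eq_zero.mpr
    intro hmem
    exact absurd rfl (Int.ne_of_lt (lt_of_mem_dropWhile_beq x xs hle hpw x hmem)).symm
  omega

theorem count_cons_ne (x z : Int) (xs : List Int) (hzx : z ≠ x) :
    List.count z (x :: xs) = List.count z (xs.dropWhile (fun y => y == x)) := by
  have hsplit : xs = xs.takeWhile (fun y => y == x) ++ xs.dropWhile (fun y => y == x) :=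
    (List.takeWhile_append_dropWhile).symm
  have hcons : List.count z (x :: xs) = List.count z xs := by
    simp [Ne.symm hzx]
  rw [hcons]
  conv_lhs => rw [hsplit]
  rw [List.count_append]
  have h1 : List.count z (xs.takeWhile (fun y => y == x)) = 0 := by
    apply List.count_eq_zero.mpr
    intro hmem
    have hb : (z == x) = true := List.mem_takeWhile_imp (p := fun y => y == x) hmem
    exact hzx (eq_of_beq hb)
  omega

theorem twoRuns_mem : ∀ (s : List Int), s.Pairwise (fun a b => b ≤ a) →
    ∀ z, z ∈ twoRuns s ↔ List.count z s = 2 := by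
  intro s
  induction s using twoRuns.induct with
  | case1 => intro _ z; rw [twoRuns_nil]; simp
  | case2 x xs run rest hrun ih =>
    intro hpw z
    rw [show rest = xs.dropWhile (fun y => y == x) from rfl] at ih
    have hle : ∀ y ∈ xs, y ≤ x := (List.pairwise_cons.mp hpw).1
    have hpw' : (xs.dropWhile (fun y => y == x)).Pairwise (fun a b => b ≤ a) :=
      List.Pairwise.sublist (List.dropWhile_sublist _) (List.pairwise_cons.mp hpw).2
    rw [twoRuns_cons, if_pos hrun]
    by_cases hz : z = x
    · subst hz
      constructor
      · intro _
        rw [count_cons_head_run z xs hle (List.pairwise_cons.mp hpw).2]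
        exact hrun
      · intro _
        exact List.mem_cons_self
    · rw [List.mem_cons]
      simp only [hz, false_or]
      rw [ih hpw' z, count_cons_ne x z xs hz]
  | case3 x xs run rest hrun ih =>
    intro hpw z
    rw [show rest = xs.dropWhile (fun y => y == x) from rfl] at ih
    have hle : ∀ y ∈ xs, y ≤ x := (List.pairwise_cons.mp hpw).1
    have hpw2 : xs.Pairwise (fun a b => b ≤ a) := (List.pairwise_cons.mp hpw).2
    have hpw' : (xs.dropWhile (fun y => y == x)).Pairwise (fun a b => b ≤ a) :=
      List.Pairwise.sublist (List.dropWhile_sublist _) hpw2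
    rw [twoRuns_cons, if_neg hrun, ih hpw' z]
    by_cases hz : z = x
    · subst hz
      have hc : List.count z (z :: xs) = (xs.takeWhile (fun y => y == z)).length + 1 :=
        count_cons_head_run z xs hle hpw2
      have hz0 : List.count z (xs.dropWhile (fun y => y == z)) = 0 := by
        apply List.count_eq_zero.mpr
        intro hmem
        exact absurd rfl (Int.ne_of_lt (lt_of_mem_dropWhile_beq z xs hle hpw2 z hmem)).symm
      constructor
      · intro h; omega
      · intro h
        rw [hc] at h
        exact absurd h hrun
    · rw [count_cons_ne x z xs hz]

theorem twoRuns_pairwise : ∀ (s : List Int), s.Pairwise (fun a b => b ≤ a) →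
    (twoRuns s).Pairwise (fun a b => b < a) := by
  intro s
  induction s using twoRuns.induct with
  | case1 => intro _; rw [twoRuns_nil]; simp
  | case2 x xs run rest hrun ih =>
    intro hpw
    rw [show rest = xs.dropWhile (fun y => y == x) from rfl] at ih
    have hle : ∀ y ∈ xs, y ≤ x := (List.pairwise_cons.mp hpw).1
    have hpw2 : xs.Pairwise (fun a b => b ≤ a) := (List.pairwise_cons.mp hpw).2
    have hpw' : (xs.dropWhile (fun y => y == x)).Pairwise (fun a b => b ≤ a) :=
      List.Pairwise.sublist (List.dropWhile_sublist _) hpw2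
    rw [twoRuns_cons, if_pos hrun]
    refine List.pairwise_cons.mpr ⟨?_, ih hpw'⟩
    intro z hz
    have hz2 : List.count z (xs.dropWhile (fun y => y == x)) = 2 :=
      (twoRuns_mem _ hpw' z).mp hz
    have hzmem : z ∈ xs.dropWhile (fun y => y == x) := by
      rw [← List.count_pos_iff]; omega
    exact lt_of_mem_dropWhile_beq x xs hle hpw2 z hzmem
  | case3 x xs run rest hrun ih =>
    intro hpw
    rw [show rest = xs.dropWhile (fun y => y == x) from rfl] at ih
    have hpw' : (xs.dropWhile (fun y => y == x)).Pairwise (fun a b => b ≤ a) :=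
      List.Pairwise.sublist (List.dropWhile_sublist _) (List.pairwise_cons.mp hpw).2
    rw [twoRuns_cons, if_neg hrun]
    exact ih hpw'

-- the core identity: A's filtered-then-sorted list IS B's run scan of the sorted input
theorem lists_eq (ranks : List Int) :
    PySem.List.sorted
      ((PySem.Set.ofList ranks).foldl
        (fun acc i => if PySem.List.count ranks i == 2 then acc ++ [i] else acc) [])
      (fun x => x) true
      = twoRuns (PySem.List.sorted ranks (fun x => x) true) := by
  set s := PySem.List.sorted ranks (fun x => x) true with hs
  have hspw : s.Pairwise (fun a b => b ≤ a) := by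
    have := PySem.List.sorted_pairwise_rev ranks (fun x => x)
    simpa [hs] using this
  have hsperm : s.Perm ranks := PySem.List.sorted_perm ranks (fun x => x) true
  rw [PySem.List.foldl_append_if (fun i => PySem.List.count ranks i == 2) (fun x => x)
        (PySem.Set.ofList ranks) []]
  simp only [List.map_id_fun', id, List.nil_append]
  apply PySem.List.sorted_rev_eq_of_perm_of_pairwise_gt
  · rw [List.perm_ext_iff_of_nodup
      (List.Pairwise.imp (fun h => (Int.ne_of_lt h).symm) (twoRuns_pairwise s hspw))
      (List.Nodup.filter _ (PySem.Set.nodup_ofList ranks))]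
    intro z
    rw [twoRuns_mem s hspw z, List.mem_filter, PySem.Set.mem_ofList]
    have hcnt : List.count z s = List.count z ranks := hsperm.count_eq z
    have hpys : PySem.List.count ranks z = List.count z ranks := by
      simp [PySem.List.count, List.count]
    constructor
    · intro h
      have hm : z ∈ ranks := by rw [← hsperm.mem_iff, ← List.count_pos_iff]; omega
      refine ⟨hm, ?_⟩
      simp only [hpys, beq_iff_eq]
      omega
    · rintro ⟨_, h⟩
      simp only [hpys, beq_iff_eq] at h
      omega
  · exact twoRuns_pairwise s hspw

-- ===== VERDICT (by name: the statement is the Claim_ definition above) =====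
theorem two_pair_spec : Claim_equal_two_pair := by
  intro ranks _
  unfold Spec_two_pair two_pair two_pair_alt
  simp only [lists_eq ranks]
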